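-- pv_equiv track=rewrite | github.com/Jesusr1297/binarySearch | medium/removeDuplicatesOccurringMoreThanTwice.py | solve
-- ===== SOURCE A (Python) =====
-- def solve(nums):
--     count = {}
--     out = []
--     for num in nums:
--         if num not in count:
--             count[num] = 1
--             out.append(num)
--         elif count[num] == 1:
--             count[num] += 1
--             out.append(num)
--     return out
-- ===== SOURCE B (Python) =====
-- def solve(nums):
--     # Value-at-a-time peeling: emit the first remaining element, then prune
--     # the rest of the list so at most one more copy of that value survives.
--     out = []
--     rest = nums
--     while rest:
--         x = rest[0]
--         out.append(x)
--         t = rest[1:]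
--         try:
--             i = t.index(x)
--             rest = t[:i + 1] + [y for y in t[i + 1:] if y != x]
--         except ValueError:
--             rest = t
--     return out
-- ===== Notes on version B (the rewrite author's own statement) =====
-- stated objective: alternative
-- what changed: Replaces A's single counting pass with a hash-map tally by value-at-a-time peeling: repeatedly emit the first remaining element and prune the rest of the list so at most one more copy of that value survives; no counts are maintained at all.
import Mathlib
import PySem

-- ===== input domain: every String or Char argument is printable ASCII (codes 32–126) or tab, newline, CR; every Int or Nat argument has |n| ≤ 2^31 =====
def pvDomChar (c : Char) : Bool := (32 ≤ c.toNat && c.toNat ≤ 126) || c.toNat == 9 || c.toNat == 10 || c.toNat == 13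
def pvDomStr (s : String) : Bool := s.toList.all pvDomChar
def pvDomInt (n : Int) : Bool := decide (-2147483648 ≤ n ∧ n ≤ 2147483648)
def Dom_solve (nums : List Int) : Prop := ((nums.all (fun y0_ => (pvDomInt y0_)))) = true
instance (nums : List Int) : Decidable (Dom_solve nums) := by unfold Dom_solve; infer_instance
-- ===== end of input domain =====

-- B drops A's count dictionary and peels one value at a time: emit the first
-- remaining element and prune the tail to keep at most one more copy of it
-- (objective: alternative decomposition, no counters).

-- ===== PORT A =====
def solveStep (st : PySem.Dict Int Int × List Int) (num : Int) : PySem.Dict Int Int × List Int :=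
  match st.1.get? num with
  | none => (st.1.insert num 1, st.2 ++ [num])
  | some v => if v = 1 then (st.1.insert num (v + 1), st.2 ++ [num]) else (st.1, st.2)

def solve (nums : List Int) : List Int :=
  (nums.foldl solveStep (PySem.Dict.empty, [])).2

-- ===== PORT B =====
-- one pruning round of Source B: t.index(x) then slices + comprehension
def pruneLoop (x : Int) (t : List Int) : List Int :=
  match PySem.List.index? t x with
  | some i =>
      PySem.List.slice t none (some ((i : Int) + 1))
        ++ (PySem.List.slice t (some ((i : Int) + 1)) none).filter (fun y => y ≠ x)
  | none => t

-- needed by solve_alt's decreasing_by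
theorem pruneLoop_len (x : Int) (t : List Int) :
    (pruneLoop x t).length ≤ t.length := by
  unfold pruneLoop
  cases h : PySem.List.index? t x with
  | none => exact le_refl _
  | some i =>
    dsimp only
    have hc : ((i : Int) + 1) = (((i + 1 : Nat) : Int)) := by push_cast; ring
    rw [hc, PySem.List.slice_to_natCast, PySem.List.slice_from_natCast]
    have hf := List.length_filter_le (fun y => y ≠ x) (t.drop (i + 1))
    simp only [List.length_append, List.length_take, List.length_drop] at *
    omega

-- while-loop of Source B as well-founded recursion on the shrinking rest
def solve_alt (nums : List Int) : List Int :=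
  match nums with
  | [] => []
  | x :: t => x :: solve_alt (pruneLoop x t)
termination_by nums.length
decreasing_by
  have := pruneLoop_len x t
  simp
  omega

-- ===== PRECONDITION & SPEC =====
def Spec_solve (nums : List Int) (out : List Int) : Prop := out = solve_alt nums
instance (nums : List Int) (out : List Int) : Decidable (Spec_solve nums out) := by unfold Spec_solve; infer_instance

-- ===== CLAIM (what is proved, stated in full; the proofs are below) =====
def Claim_equal_solve : Prop := ∀ (nums : List Int), Dom_solve nums → Spec_solve nums (solve nums)

-- ===== LEMMAS AND PROOFS =====

-- Canonical middle form: keep an element iff the output so far holds it < 2 times.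
def foldC (out : List Int) (y : Int) : List Int :=
  if out.count y < 2 then out ++ [y] else out

def canon (nums : List Int) : List Int := nums.foldl foldC []

-- ---- A = canon: the dict carries exactly the multiplicity of each key in out (absent = 0), capped at 2.
def SolveInv (count : PySem.Dict Int Int) (out : List Int) : Prop :=
  ∀ k : Int, (count.get? k = if out.count k = 0 then none else some ((out.count k : Int)))
              ∧ out.count k ≤ 2

theorem inv_nil : SolveInv PySem.Dict.empty [] := by
  intro k; simp [PySem.Dict.get?_empty]

theorem count_append_ne (out : List Int) (num k : Int) (h : k ≠ num) :
    (out ++ [num]).count k = out.count k := by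
  simp [List.count_append, Ne.symm h]

theorem inv_step (count : PySem.Dict Int Int) (out : List Int) (num : Int)
    (h : SolveInv count out) :
    (solveStep (count, out) num).2 = foldC out num
    ∧ SolveInv (solveStep (count, out) num).1 (solveStep (count, out) num).2 := by
  have hnum := h num
  rcases hc : out.count num with _ | _ | m
  · have hg : count.get? num = none := by rw [hnum.1, hc]; simp
    constructor
    · simp [solveStep, hg, foldC, hc]
    · simp only [solveStep, hg]
      intro k
      by_cases hk : k = num
      · subst hk
        simp [hc, PySem.Dict.get?_insert_self]
      · rw [count_append_ne out num k hk, PySem.Dict.get?_insert_of_ne _ _ hk]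
        exact h k
  · have hg : count.get? num = some 1 := by rw [hnum.1, hc]; simp
    constructor
    · simp [solveStep, hg, foldC, hc]
    · simp only [solveStep, hg, if_pos]
      intro k
      by_cases hk : k = num
      · subst hk
        simp [hc, PySem.Dict.get?_insert_self]
      · rw [count_append_ne out num k hk, PySem.Dict.get?_insert_of_ne _ _ hk]
        exact h k
  · have h2 : out.count num ≤ 2 := hnum.2
    have hm : m = 0 := by omega
    subst hm
    have hg : count.get? num = some 2 := by rw [hnum.1, hc]; simp
    constructor
    · simp [solveStep, hg, foldC, hc]
    · simpa only [solveStep, hg] using h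

theorem fold_eq (nums : List Int) :
    ∀ (count : PySem.Dict Int Int) (out : List Int), SolveInv count out →
    (nums.foldl solveStep (count, out)).2 = nums.foldl foldC out := by
  induction nums with
  | nil => intro count out _; rfl
  | cons num rest ih =>
    intro count out h
    obtain ⟨h1, h2⟩ := inv_step count out num h
    simp only [List.foldl_cons]
    rw [show solveStep (count, out) num
          = ((solveStep (count, out) num).1, (solveStep (count, out) num).2) from rfl]
    rw [ih _ _ h2, h1]

theorem solve_eq_canon (nums : List Int) : solve nums = canon nums :=
  fold_eq nums PySem.Dict.empty [] inv_nil

-- ---- B = canon.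
-- Recursive form of the inner pruning loop.
def pruneRec (x : Int) : List Int → List Int
  | [] => []
  | y :: t => if y = x then y :: t.filter (fun z => z ≠ x) else y :: pruneRec x t

theorem pruneRec_of_not_mem (x : Int) :
    ∀ (t : List Int), x ∉ t → pruneRec x t = t := by
  intro t
  induction t with
  | nil => intro _; rfl
  | cons y t ih =>
    intro h
    have hy : y ≠ x := fun e => h (by simp [e])
    have ht : x ∉ t := fun e => h (by simp [e])
    simp [pruneRec, hy, ih ht]

theorem pruneRec_split (x : Int) (suf : List Int) :
    ∀ (pre : List Int), x ∉ pre →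
      pruneRec x (pre ++ x :: suf) = pre ++ x :: suf.filter (fun z => z ≠ x) := by
  intro pre
  induction pre with
  | nil => intro _; simp [pruneRec]
  | cons p pre ih =>
    intro h
    have hp : p ≠ x := fun e => h (by simp [e])
    have hpre : x ∉ pre := fun e => h (by simp [e])
    simp [pruneRec, hp, ih hpre]

theorem pruneLoop_eq_pruneRec (x : Int) (t : List Int) :
    pruneLoop x t = pruneRec x t := by
  unfold pruneLoop
  cases h : PySem.List.index? t x with
  | none =>
    rw [pruneRec_of_not_mem x t (by rwa [← PySem.List.index?_eq_none_iff])]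
  | some i =>
    dsimp only
    obtain ⟨pre, suf, ht, hlen, hnotin⟩ := (PySem.List.index?_eq_some_iff t x i).1 h
    subst ht
    have hc : ((i : Int) + 1) = (((i + 1 : Nat) : Int)) := by push_cast; ring
    rw [hc, PySem.List.slice_to_natCast, PySem.List.slice_from_natCast]
    have hl : i + 1 = (pre ++ [x]).length := by simp [hlen]
    have happ : pre ++ x :: suf = (pre ++ [x]) ++ suf := by simp
    rw [happ, hl, List.take_left, List.drop_left, ← happ]
    rw [pruneRec_split x suf pre hnotin]
    simp

-- folding over a list with no x, with an extra x in front of the accumulator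
theorem foldC_cons_notmem (x : Int) :
    ∀ (s o : List Int), (∀ y ∈ s, y ≠ x) →
      s.foldl foldC (x :: o) = x :: s.foldl foldC o := by
  intro s
  induction s with
  | nil => intro o _; rfl
  | cons y s ih =>
    intro o hs
    have hy : y ≠ x := hs y (by simp)
    have hcnt : (x :: o).count y = o.count y := by
      simp [Ne.symm hy]
    have hs' : ∀ z ∈ s, z ≠ x := fun z hz => hs z (by simp [hz])
    simp only [List.foldl_cons, foldC, hcnt]
    by_cases h2 : o.count y < 2
    · simp only [if_pos h2]
      rw [show (x :: o) ++ [y] = x :: (o ++ [y]) from rfl]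
      exact ih (o ++ [y]) hs'
    · simp only [if_neg h2]
      exact ih o hs'

-- once the accumulator holds x twice, later x's are dropped, so they can be filtered away
theorem foldC_saturated (x : Int) :
    ∀ (t out : List Int), 2 ≤ out.count x →
      t.foldl foldC out = (t.filter (fun z => z ≠ x)).foldl foldC out := by
  intro t
  induction t with
  | nil => intro out _; rfl
  | cons y t ih =>
    intro out hout
    by_cases hy : y = x
    · subst hy
      have : ¬ out.count y < 2 := by omega
      simp [List.foldl_cons, foldC, this, ih out hout]
    · have : (out ++ [y]).count x = out.count x := count_append_ne out y x (Ne.symm hy)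
      simp only [List.filter_cons, List.foldl_cons]
      have hb : (fun z => decide (z ≠ x)) y = true := by simp [hy]
      simp only [hy, decide_not] at *
      by_cases h2 : out.count y < 2
      · simp [foldC, h2, ih (out ++ [y]) (by omega)]
      · simp [foldC, h2, ih out hout]

-- lockstep: processing t after an extra leading x = processing the pruned t
theorem foldC_lockstep (x : Int) :
    ∀ (t out2 : List Int), out2.count x = 0 →
      t.foldl foldC (x :: out2) = x :: (pruneRec x t).foldl foldC out2 := by
  intro t
  induction t with
  | nil => intro out2 _; rfl
  | cons y t ih =>
    intro out2 h0
    by_cases hy : y = x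
    · subst hy
      have h1 : (y :: out2).count y = 1 := by simp [h0]
      have hlt : (y :: out2).count y < 2 := by omega
      have hsat : 2 ≤ ((y :: out2) ++ [y]).count y := by
        simp [List.count_append]
      simp only [List.foldl_cons, foldC, hlt, if_pos, pruneRec]
      rw [foldC_saturated y t _ hsat]
      rw [show (y :: out2) ++ [y] = y :: (out2 ++ [y]) from rfl]
      rw [foldC_cons_notmem y (t.filter (fun z => z ≠ y)) (out2 ++ [y])
            (by intro z hz; simpa using (List.of_mem_filter hz))]
      have hlt2 : out2.count y < 2 := by omega
      simp [hlt2]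
    · have hcnt : (x :: out2).count y = out2.count y := by
        simp [Ne.symm hy]
      have hpr : pruneRec x (y :: t) = y :: pruneRec x t := by
        simp [pruneRec, hy]
      rw [hpr]
      simp only [List.foldl_cons, foldC, hcnt]
      by_cases h2 : out2.count y < 2
      · simp only [if_pos h2]
        rw [show (x :: out2) ++ [y] = x :: (out2 ++ [y]) from rfl]
        have h0' : (out2 ++ [y]).count x = 0 := by
          rw [count_append_ne out2 y x (Ne.symm hy)]; exact h0
        exact ih (out2 ++ [y]) h0'
      · simp only [if_neg h2]
        exact ih out2 h0

theorem canon_cons (x : Int) (t : List Int) :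
    canon (x :: t) = x :: canon (pruneRec x t) := by
  unfold canon
  simp only [List.foldl_cons, foldC, List.count_nil, List.nil_append]
  norm_num
  simpa using foldC_lockstep x t [] (by simp)

theorem alt_eq_canon (nums : List Int) : solve_alt nums = canon nums := by
  induction nums using solve_alt.induct with
  | case1 => simp [solve_alt, canon]
  | case2 x t ih =>
    rw [solve_alt, ih, pruneLoop_eq_pruneRec, canon_cons]

-- ===== VERDICT (by name: the statement is the Claim_ definition above) =====
theorem solve_spec : Claim_equal_solve := by
  intro nums _
  unfold Spec_solve
  rw [solve_eq_canon, alt_eq_canon]
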